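-- pv_equiv track=rewrite | github.com/bryanliu/python-playground | algorithm/UnionFind_findequationsvalid.py | validEquation
-- ===== SOURCE A (Python) =====
-- from typing import List
--
-- class UnionFind:
--
--     def __init__(self):
--         self.parents = {}
--
--     def find(self, x: str) -> int:
--         if x not in self.parents:
--             self.parents[x] = x
--             return x
--         if self.parents[x] != x:
--             self.parents[x] = self.find(self.parents[x])
--         return self.parents[x]
--
--     def union(self, x, y) -> None:
--         x, y = self.find(x), self.find(y)
--         if x != y:
--             self.parents[x] = y
--
-- def validEquation(equations: List[List]):
--     if not equations: return False
--
--     uf = UnionFind()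
--
--     for eq in equations:
--         if eq[1] == "=":
--             x, y = eq[0], eq[3]
--             uf.union(x, y)
--
--     for eq in equations:
--         if eq[1] == "!":
--             x, y = eq[0], eq[3]
--             if uf.find(x) == uf.find(y):
--                 return False
--
--     return True
-- ===== SOURCE B (Python) =====
-- def _ensure(comp, nxt, v):
--     # give v a fresh component label if it has none yet; return the next free label
--     if v not in comp:
--         comp[v] = nxt
--         nxt += 1
--     return nxt
--
--
-- def validEquation(equations):
--     if not equations:
--         return False
--
--     # label propagation: each variable gets an integer component label;
--     # an equality merges two components by rewriting one label to the other
--     comp = {}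
--     nxt = 0
--     for eq in equations:
--         if eq[1] == "=":
--             a, b = eq[0], eq[3]
--             nxt = _ensure(comp, nxt, a)
--             nxt = _ensure(comp, nxt, b)
--             ca, cb = comp[a], comp[b]
--             if ca != cb:
--                 comp = {k: (cb if v == ca else v) for k, v in comp.items()}
--
--     for eq in equations:
--         if eq[1] == "!":
--             a, b = eq[0], eq[3]
--             if a == b:
--                 return False
--             ca, cb = comp.get(a), comp.get(b)
--             if ca is not None and ca == cb:
--                 return False
--     return True
-- ===== Notes on version B (the rewrite author's own statement) =====
-- stated objective: alternative
-- what changed: Replaces the recursive union-find with path compression by eager label propagation: a dict assigns each variable an integer component label, an equality rewrites one label to the other across the dict, and inequality checks become plain label lookups with no mutation; Pre_ excludes only equation strings too short to index (on which A raises IndexError).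
import Mathlib
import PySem

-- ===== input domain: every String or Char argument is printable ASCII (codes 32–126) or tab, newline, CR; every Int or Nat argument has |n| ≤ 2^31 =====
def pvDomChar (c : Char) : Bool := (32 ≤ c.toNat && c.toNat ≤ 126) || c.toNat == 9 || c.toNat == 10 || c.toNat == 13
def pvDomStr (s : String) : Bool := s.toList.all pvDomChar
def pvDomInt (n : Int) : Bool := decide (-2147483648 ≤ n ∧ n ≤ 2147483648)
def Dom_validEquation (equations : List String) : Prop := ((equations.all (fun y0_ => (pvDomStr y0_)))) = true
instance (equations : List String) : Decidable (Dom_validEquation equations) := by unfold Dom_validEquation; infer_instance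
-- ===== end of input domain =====

-- B replaces A's recursive union-find (path compression) by eager label propagation over a
-- label dict; objective: alternative (similar cost, no recursion). Equal return values on Pre_.

-- ===== PORT A =====
-- UnionFind.find, with explicit fuel for the recursion; fuel `d.size + 1` is proved
-- sufficient below (parent chains are acyclic), so the port is exact wherever Python's find returns.
def findA : Nat → PySem.Dict Char Char → Char → Char × PySem.Dict Char Char
  | 0, d, x => (x, d)
  | fuel + 1, d, x =>
    match d.get? x with
    | none => (x, d.insert x x)                  -- x not in parents: parents[x] = x; return x
    | some p =>
      if p = x then (x, d)                       -- parents[x] == x: return parents[x]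
      else
        let rd := findA fuel d p                 -- parents[x] = find(parents[x])
        (rd.1, rd.2.insert x rd.1)               -- return parents[x]

-- UnionFind.union
def unionA (d : PySem.Dict Char Char) (x y : Char) : PySem.Dict Char Char :=
  let rd1 := findA (d.size + 1) d x
  let rd2 := findA (rd1.2.size + 1) rd1.2 y
  if rd1.1 ≠ rd2.1 then rd2.2.insert rd1.1 rd2.1 else rd2.2

-- body of the first loop: union every "=" equation
def stepA (d : PySem.Dict Char Char) (eq : String) : PySem.Dict Char Char :=
  if PySem.Str.pyGet? eq 1 = some '=' then
    match PySem.Str.pyGet? eq 0, PySem.Str.pyGet? eq 3 with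
    | some x, some y => unionA d x y
    | _, _ => d
  else d

def firstPassA (equations : List String) : PySem.Dict Char Char :=
  equations.foldl stepA PySem.Dict.empty

-- second loop: check every "!" equation (find mutates the dict, so it is threaded)
def checkA : PySem.Dict Char Char → List String → Bool
  | _, [] => true
  | d, eq :: rest =>
    if PySem.Str.pyGet? eq 1 = some '!' then
      match PySem.Str.pyGet? eq 0, PySem.Str.pyGet? eq 3 with
      | some x, some y =>
        let rd1 := findA (d.size + 1) d x
        let rd2 := findA (rd1.2.size + 1) rd1.2 y
        if rd1.1 = rd2.1 then false else checkA rd2.2 rest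
      | _, _ => checkA d rest
    else checkA d rest

def validEquation (equations : List String) : Bool :=
  if equations = [] then false
  else checkA (firstPassA equations) equations

-- ===== PORT B =====
-- _ensure: give v a fresh component label if it has none yet (state = (comp, nxt))
def ensureB (st : PySem.Dict Char Int × Int) (v : Char) : PySem.Dict Char Int × Int :=
  if st.1.contains v then st else (st.1.insert v st.2, st.2 + 1)

-- one "=" step: ensure labels for both variables, then rewrite label ca to cb
def altStep (st : PySem.Dict Char Int × Int) (eq : String) : PySem.Dict Char Int × Int :=
  if PySem.Str.pyGet? eq 1 = some '=' then
    match PySem.Str.pyGet? eq 0, PySem.Str.pyGet? eq 3 with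
    | some a, some b =>
      let st2 := ensureB (ensureB st a) b
      let ca := st2.1.getD a 0
      let cb := st2.1.getD b 0
      if ca ≠ cb then
        (PySem.Dict.mk (st2.1.items.map (fun p => (p.1, if p.2 = ca then cb else p.2))), st2.2)
      else st2
    | _, _ => st
  else st

def altCheck (comp : PySem.Dict Char Int) : List String → Bool
  | [] => true
  | eq :: rest =>
    if PySem.Str.pyGet? eq 1 = some '!' then
      match PySem.Str.pyGet? eq 0, PySem.Str.pyGet? eq 3 with
      | some a, some b =>
        if a = b then false
        else
          match comp.get? a, comp.get? b with
          | some ca, some cb => if ca = cb then false else altCheck comp rest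
          | _, _ => altCheck comp rest
      | _, _ => altCheck comp rest
    else altCheck comp rest

def validEquation_alt (equations : List String) : Bool :=
  if equations = [] then false
  else altCheck (equations.foldl altStep (PySem.Dict.empty, 0)).1 equations

-- ===== PRECONDITION & SPEC =====
-- Pre_ excludes exactly the equation strings on which Python A raises IndexError:
-- strings shorter than 2 characters (eq[1]), and strings whose second character is
-- '=' or '!' but that are shorter than 4 characters (eq[3]).
def Pre_validEquation (equations : List String) : Prop :=
  ∀ s ∈ equations, 2 ≤ s.toList.length ∧
    ((s.toList[1]? = some '=' ∨ s.toList[1]? = some '!') → 4 ≤ s.toList.length)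
instance (equations : List String) : Decidable (Pre_validEquation equations) := by
  unfold Pre_validEquation; infer_instance

def pvWitness_validEquation : List String := ["a==b", "b==c", "a!=c", "d!=d"]

def Spec_validEquation (equations : List String) (out : Bool) : Prop := out = validEquation_alt equations
instance (equations : List String) (out : Bool) : Decidable (Spec_validEquation equations out) := by unfold Spec_validEquation; infer_instance

-- ===== CLAIM (what is proved, stated in full; the proofs are below) =====
def Claim_equal_validEquation : Prop := ∀ (equations : List String), Dom_validEquation equations → Pre_validEquation equations → Spec_validEquation equations (validEquation equations)

-- ===== LEMMAS AND PROOFS =====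
-- ---- proof-side machinery: parent-chain semantics of A's dict ----

def pstep (d : PySem.Dict Char Char) (y : Char) : Char := d.getD y y

def IsRootUF (d : PySem.Dict Char Char) (r : Char) : Prop := pstep d r = r

def RootUF (d : PySem.Dict Char Char) (x r : Char) : Prop :=
  ∃ n : Nat, (pstep d)^[n] x = r ∧ IsRootUF d r

def SRel (d : PySem.Dict Char Char) (u v : Char) : Prop :=
  ∃ r, RootUF d u r ∧ RootUF d v r

def InvUF (d : PySem.Dict Char Char) : Prop :=
  d.keys.Nodup ∧ ∃ rank : Char → Nat, ∀ x, pstep d x ≠ x → rank x < rank (pstep d x)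

def eqL (comp : PySem.Dict Char Int) (u v : Char) : Prop :=
  u = v ∨ ∃ i, comp.get? u = some i ∧ comp.get? v = some i

def BInv (comp : PySem.Dict Char Int) (nxt : Int) : Prop :=
  ∀ u i, comp.get? u = some i → i < nxt

def SimUF (d : PySem.Dict Char Char) (comp : PySem.Dict Char Int) : Prop :=
  ∀ u v, SRel d u v ↔ eqL comp u v

-- ---- basic root lemmas ----

theorem iter_fix {d : PySem.Dict Char Char} {y : Char} (h : IsRootUF d y) :
    ∀ k, (pstep d)^[k] y = y := by
  intro k; induction k with
  | zero => rfl
  | succ k ih => rw [Function.iterate_succ_apply', ih]; exact h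

theorem root_self {d : PySem.Dict Char Char} {r : Char} (h : IsRootUF d r) : RootUF d r r :=
  ⟨0, rfl, h⟩

theorem root_unique {d : PySem.Dict Char Char} {x r r' : Char}
    (h : RootUF d x r) (h' : RootUF d x r') : r = r' := by
  obtain ⟨n, hn, hr⟩ := h
  obtain ⟨m, hm, hr'⟩ := h'
  rcases Nat.le_total n m with hle | hle
  · obtain ⟨k, rfl⟩ := Nat.exists_eq_add_of_le hle
    rw [Nat.add_comm, Function.iterate_add_apply, hn, iter_fix hr] at hm
    exact hm
  · obtain ⟨k, rfl⟩ := Nat.exists_eq_add_of_le hle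
    rw [Nat.add_comm, Function.iterate_add_apply, hm, iter_fix hr'] at hn
    exact hn.symm

theorem root_cons {d : PySem.Dict Char Char} {x r : Char}
    (h : RootUF d (pstep d x) r) : RootUF d x r := by
  obtain ⟨n, hn, hr⟩ := h
  exact ⟨n + 1, by rw [Function.iterate_succ_apply]; exact hn, hr⟩

theorem sr_iff_roots {d : PySem.Dict Char Char} {u v ru rv : Char}
    (hu : RootUF d u ru) (hv : RootUF d v rv) : SRel d u v ↔ ru = rv := by
  constructor
  · rintro ⟨r, hur, hvr⟩
    rw [root_unique hu hur, root_unique hv hvr]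
  · rintro rfl; exact ⟨ru, hu, hv⟩

theorem pstep_insert (d : PySem.Dict Char Char) (x r y : Char) :
    pstep (d.insert x r) y = if y = x then r else pstep d y := by
  simp [pstep, PySem.Dict.getD_insert]

theorem rank_le_iter {d : PySem.Dict Char Char} {rank : Char → Nat}
    (hrank : ∀ x, pstep d x ≠ x → rank x < rank (pstep d x)) :
    ∀ (n : Nat) (x : Char), rank x ≤ rank ((pstep d)^[n] x) := by
  intro n; induction n with
  | zero => intro x; exact Nat.le_refl _
  | succ n ih =>
    intro x
    rw [Function.iterate_succ_apply', ]
    by_cases h : pstep d ((pstep d)^[n] x) = (pstep d)^[n] x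
    · rw [h]; exact ih x
    · exact Nat.le_of_lt (Nat.lt_of_le_of_lt (ih x) (hrank _ h))

theorem rank_lt_root {d : PySem.Dict Char Char} {rank : Char → Nat}
    (hrank : ∀ x, pstep d x ≠ x → rank x < rank (pstep d x))
    {x r : Char} (hroot : RootUF d x r) (hx : pstep d x ≠ x) : rank x < rank r := by
  obtain ⟨n, hn, hr⟩ := hroot
  cases n with
  | zero =>
    simp only [Function.iterate_zero_apply] at hn
    subst hn; exact absurd hr hx
  | succ n =>
    rw [Function.iterate_succ_apply] at hn
    calc rank x < rank (pstep d x) := hrank x hx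
      _ ≤ rank ((pstep d)^[n] (pstep d x)) := rank_le_iter hrank n _
      _ = rank r := by rw [hn]

theorem isroot_insert {d : PySem.Dict Char Char} {x r : Char} (h : RootUF d x r) (s : Char) :
    IsRootUF (d.insert x r) s ↔ IsRootUF d s := by
  obtain ⟨nx, hnx, hrroot⟩ := h
  have h' : RootUF d x r := ⟨nx, hnx, hrroot⟩
  unfold IsRootUF
  rw [pstep_insert]
  by_cases hs : s = x
  · subst hs
    rw [if_pos rfl]
    by_cases hrx : r = s
    · subst hrx; simpa [IsRootUF] using hrroot
    · constructor
      · intro hrs; exact absurd hrs hrx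
      · intro hroot
        exact absurd (root_unique h' (root_self hroot)) hrx
  · rw [if_neg hs]

theorem root_insert_equiv {d : PySem.Dict Char Char} {x r : Char} (h : RootUF d x r) :
    ∀ y s, RootUF (d.insert x r) y s ↔ RootUF d y s := by
  obtain ⟨nx, hnx, hrroot⟩ := h
  have h' : RootUF d x r := ⟨nx, hnx, hrroot⟩
  have hfwd : ∀ (n : Nat) (y s : Char), (pstep (d.insert x r))^[n] y = s →
      IsRootUF (d.insert x r) s → RootUF d y s := by
    intro n
    induction n with
    | zero =>
      intro y s hy hs
      subst hy
      exact root_self ((isroot_insert h' _).mp hs)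
    | succ n ih =>
      intro y s hy hs
      rw [Function.iterate_succ_apply] at hy
      have ihy := ih _ _ hy hs
      by_cases hyx : y = x
      · subst hyx
        rw [pstep_insert, if_pos rfl] at ihy
        have hsr : s = r := root_unique ihy (root_self hrroot)
        subst hsr; exact h'
      · rw [pstep_insert, if_neg hyx] at ihy
        exact root_cons ihy
  have hbwd : ∀ (n : Nat) (y s : Char), (pstep d)^[n] y = s →
      IsRootUF d s → RootUF (d.insert x r) y s := by
    intro n
    induction n with
    | zero =>
      intro y s hy hs
      subst hy
      exact root_self ((isroot_insert h' _).mpr hs)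
    | succ n ih =>
      intro y s hy hs
      rw [Function.iterate_succ_apply] at hy
      have ihy := ih _ _ hy hs
      by_cases hyx : y = x
      · have hsx : RootUF d x s :=
          ⟨n + 1, by rw [Function.iterate_succ_apply, ← hyx]; exact hy, hs⟩
        have hsr : s = r := root_unique hsx h'
        rw [hyx, hsr]
        refine root_cons ?_
        rw [pstep_insert, if_pos rfl]
        exact root_self ((isroot_insert h' _).mpr hrroot)
      · refine root_cons ?_
        rw [pstep_insert, if_neg hyx]
        exact ihy
  intro y s
  constructor
  · rintro ⟨n, hn, hs⟩; exact hfwd n y s hn hs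
  · rintro ⟨n, hn, hs⟩; exact hbwd n y s hn hs

theorem inv_insert_root {d : PySem.Dict Char Char} {x r : Char}
    (hinv : InvUF d) (h : RootUF d x r) : InvUF (d.insert x r) := by
  refine ⟨PySem.Dict.nodup_keys_insert d x r hinv.1, ?_⟩
  obtain ⟨rank, hrank⟩ := hinv.2
  refine ⟨rank, ?_⟩
  intro y hy
  rw [pstep_insert] at hy ⊢
  by_cases hyx : y = x
  · subst hyx
    rw [if_pos rfl] at hy ⊢
    have hxnr : pstep d y ≠ y := by
      intro hroot
      exact hy (root_unique h (root_self hroot)) 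
    exact rank_lt_root hrank h hxnr
  · rw [if_neg hyx] at hy ⊢
    exact hrank y hy

theorem isroot_union {d : PySem.Dict Char Char} {rx ry : Char}
    (hry : IsRootUF d ry) (hne : rx ≠ ry) (s : Char) :
    IsRootUF (d.insert rx ry) s ↔ (s ≠ rx ∧ IsRootUF d s) := by
  unfold IsRootUF
  rw [pstep_insert]
  by_cases hs : s = rx
  · subst hs
    rw [if_pos rfl]
    constructor
    · intro hcontra; exact absurd hcontra.symm hne
    · rintro ⟨hc, -⟩; exact absurd rfl hc
  · simp [hs]

theorem root_union_equiv {d : PySem.Dict Char Char} {rx ry : Char}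
    (hrx : IsRootUF d rx) (hry : IsRootUF d ry) (hne : rx ≠ ry) :
    ∀ y s, RootUF (d.insert rx ry) y s ↔
      ∃ s0, RootUF d y s0 ∧ s = if s0 = rx then ry else s0 := by
  have hryd' : RootUF (d.insert rx ry) rx ry := by
    refine root_cons ?_
    rw [pstep_insert, if_pos rfl]
    exact root_self ((isroot_union hry hne ry).mpr ⟨(Ne.symm hne), hry⟩)
  have hfwd : ∀ (n : Nat) (y s : Char), (pstep (d.insert rx ry))^[n] y = s →
      IsRootUF (d.insert rx ry) s →
      ∃ s0, RootUF d y s0 ∧ s = if s0 = rx then ry else s0 := by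
    intro n
    induction n with
    | zero =>
      intro y s hy hs
      simp only [Function.iterate_zero_apply] at hy
      subst hy
      obtain ⟨hs1, hs2⟩ := (isroot_union hry hne _).mp hs
      exact ⟨y, root_self hs2, by rw [if_neg hs1]⟩
    | succ n ih =>
      intro y s hy hs
      rw [Function.iterate_succ_apply] at hy
      obtain ⟨s0, hroot, hphi⟩ := ih _ _ hy hs
      by_cases hyx : y = rx
      · rw [hyx, pstep_insert, if_pos rfl] at hroot
        have hs0 : s0 = ry := root_unique hroot (root_self hry)
        rw [hyx]
        refine ⟨rx, root_self hrx, ?_⟩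
        rw [if_pos rfl, hphi, hs0, if_neg (Ne.symm hne)]
      · rw [pstep_insert, if_neg hyx] at hroot
        exact ⟨s0, root_cons hroot, hphi⟩
  have hbwd : ∀ (n : Nat) (y s0 : Char), (pstep d)^[n] y = s0 → IsRootUF d s0 →
      RootUF (d.insert rx ry) y (if s0 = rx then ry else s0) := by
    intro n
    induction n with
    | zero =>
      intro y s0 hy hs
      simp only [Function.iterate_zero_apply] at hy
      subst hy
      by_cases hyx : y = rx
      · rw [if_pos hyx, hyx]; exact hryd'
      · rw [if_neg hyx]
        exact root_self ((isroot_union hry hne y).mpr ⟨hyx, hs⟩)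
    | succ n ih =>
      intro y s0 hy hs
      rw [Function.iterate_succ_apply] at hy
      by_cases hyx : y = rx
      · have hfix : pstep d y = y := by rw [hyx]; exact hrx
        rw [hfix] at hy
        have hiter : (pstep d)^[n] y = y := iter_fix (show IsRootUF d y from hfix) n
        rw [hiter] at hy
        subst hy
        rw [if_pos hyx, hyx]
        exact hryd'
      · have := ih _ _ hy hs
        refine root_cons ?_
        rw [pstep_insert, if_neg hyx]
        exact this
  intro y s
  constructor
  · rintro ⟨n, hn, hs⟩; exact hfwd n y s hn hs
  · rintro ⟨s0, ⟨n, hn, hs0⟩, rfl⟩; exact hbwd n y s0 hn hs0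

theorem inv_union {d : PySem.Dict Char Char} {rx ry : Char}
    (hrx : IsRootUF d rx) (hry : IsRootUF d ry) (hne : rx ≠ ry)
    (hinv : InvUF d) : InvUF (d.insert rx ry) := by
  refine ⟨PySem.Dict.nodup_keys_insert d rx ry hinv.1, ?_⟩
  obtain ⟨rank, hrank⟩ := hinv.2
  refine ⟨fun z => if z = ry then rank ry + rank rx + 1 else rank z, ?_⟩
  intro y hy
  dsimp only
  rw [pstep_insert] at hy ⊢
  by_cases hyx : y = rx
  · rw [if_pos hyx] at hy ⊢
    have hyry : y ≠ ry := by rw [hyx]; exact hne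
    rw [if_neg hyry, if_pos rfl, hyx]
    omega
  · rw [if_neg hyx] at hy ⊢
    have hyry : y ≠ ry := by
      intro hcontra; rw [hcontra] at hy; exact hy hry
    rw [if_neg hyry]
    have := hrank y hy
    by_cases hp : pstep d y = ry
    · rw [if_pos hp]; rw [hp] at this; omega
    · rw [if_neg hp]; omega

theorem nonroot_mem_keys {d : PySem.Dict Char Char} {y : Char}
    (h : pstep d y ≠ y) : y ∈ d.keys := by
  cases hg : d.get? y with
  | none =>
    exact absurd (PySem.Dict.getD_of_get?_eq_none d y hg) h
  | some p =>
    by_contra hmem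
    rw [← PySem.Dict.get?_eq_none_iff_not_mem_keys] at hmem
    rw [hmem] at hg
    simp at hg

theorem root_total {d : PySem.Dict Char Char} (hinv : InvUF d) (x : Char) :
    ∃ n, n ≤ d.size ∧ IsRootUF d ((pstep d)^[n] x) := by
  by_contra hcon
  push_neg at hcon
  obtain ⟨rank, hrank⟩ := hinv.2
  have hnr : ∀ i ≤ d.size, ¬IsRootUF d ((pstep d)^[i] x) := fun i hi => hcon i hi
  have aux : ∀ j, j ≤ d.size + 1 → ∀ i, i < j →
      rank ((pstep d)^[i] x) < rank ((pstep d)^[j] x) := by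
    intro j
    induction j with
    | zero => intro _ i hi; omega
    | succ j ihj =>
      intro hj i hi
      have hstep : rank ((pstep d)^[j] x) < rank ((pstep d)^[j+1] x) := by
        rw [Function.iterate_succ_apply']
        exact hrank _ (hnr j (by omega))
      rcases Nat.lt_succ_iff_lt_or_eq.mp hi with hlt | rfl
      · exact Nat.lt_trans (ihj (by omega) i hlt) hstep
      · exact hstep
  set L : List Char := (List.range (d.size + 1)).map (fun i => (pstep d)^[i] x) with hL
  have hlen : L.length = d.size + 1 := by simp [hL]
  have hnodup : L.Nodup := by
    rw [List.Nodup]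
    rw [List.pairwise_iff_getElem]
    intro i j hi hj hij
    simp only [hL, List.getElem_map, List.getElem_range]
    intro hcontra
    have hjj : j ≤ d.size + 1 := by rw [hlen] at hj; omega
    have := aux j (by omega) i hij
    rw [hcontra] at this
    omega
  have hsub : ∀ a ∈ L, a ∈ d.keys := by
    intro a ha
    simp only [hL, List.mem_map, List.mem_range] at ha
    obtain ⟨i, hi, rfl⟩ := ha
    exact nonroot_mem_keys (hnr i (by omega))
  have hkeyslen : d.keys.length = d.size := by simp [PySem.Dict.keys, PySem.Dict.size]
  have : L.length ≤ d.keys.length := by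
    calc L.length = L.toFinset.card := (List.toFinset_card_of_nodup hnodup).symm
      _ ≤ d.keys.toFinset.card := Finset.card_le_card (by
          intro a ha; rw [List.mem_toFinset] at *; exact hsub a (by simpa using ha))
      _ ≤ d.keys.length := d.keys.toFinset_card_le
  omega

theorem root_isroot {d : PySem.Dict Char Char} {x r : Char} (h : RootUF d x r) :
    IsRootUF d r := by obtain ⟨_, _, hr⟩ := h; exact hr

theorem sr_symm {d : PySem.Dict Char Char} {u v : Char} (h : SRel d u v) : SRel d v u := by
  obtain ⟨r, a, b⟩ := h; exact ⟨r, b, a⟩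

theorem sr_trans {d : PySem.Dict Char Char} {u v w : Char}
    (h1 : SRel d u v) (h2 : SRel d v w) : SRel d u w := by
  obtain ⟨r, a, b⟩ := h1
  obtain ⟨r', c, e⟩ := h2
  exact ⟨r, a, root_unique c b ▸ e⟩

theorem sr_equiv {d d' : PySem.Dict Char Char}
    (h : ∀ y s, RootUF d' y s ↔ RootUF d y s) (u v : Char) :
    SRel d' u v ↔ SRel d u v := by
  unfold SRel
  simp only [h]

theorem find_spec : ∀ (fuel : Nat) (d : PySem.Dict Char Char) (x : Char) (n : Nat),
    InvUF d → n < fuel → IsRootUF d ((pstep d)^[n] x) →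
    RootUF d x (findA fuel d x).1 ∧ InvUF (findA fuel d x).2 ∧
      (∀ y s, RootUF (findA fuel d x).2 y s ↔ RootUF d y s) := by
  intro fuel
  induction fuel with
  | zero => intro d x n _ hn _; omega
  | succ fuel ih =>
    intro d x n hinv hn hroot
    cases hx : d.get? x with
    | none =>
      have hrx : IsRootUF d x := by
        unfold IsRootUF pstep
        rw [PySem.Dict.getD_of_get?_eq_none d x hx]
      have hres : findA (fuel+1) d x = (x, d.insert x x) := by simp [findA, hx]
      rw [hres]
      have hrootx : RootUF d x x := root_self hrx
      exact ⟨hrootx, inv_insert_root hinv hrootx, root_insert_equiv hrootx⟩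
    | some p =>
      by_cases hp : p = x
      · have hres : findA (fuel+1) d x = (x, d) := by simp [findA, hx, hp]
        rw [hres]
        have hrx : IsRootUF d x := by
          unfold IsRootUF pstep
          rw [PySem.Dict.getD_of_get?_eq_some d x hx]
          exact hp
        exact ⟨root_self hrx, hinv, fun y s => Iff.rfl⟩
      · have hpstep : pstep d x = p := PySem.Dict.getD_of_get?_eq_some d x hx
        have hxnr : pstep d x ≠ x := by rw [hpstep]; exact hp
        cases n with
        | zero =>
          simp only [Function.iterate_zero_apply] at hroot
          exact absurd hroot hxnr
        | succ n =>
          have hrootp : IsRootUF d ((pstep d)^[n] p) := by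
            rw [← hpstep, ← Function.iterate_succ_apply]
            exact hroot
          obtain ⟨hrootP, hinv', hequiv⟩ := ih d p n hinv (by omega) hrootp
          have hres : findA (fuel+1) d x =
              ((findA fuel d p).1, (findA fuel d p).2.insert x (findA fuel d p).1) := by
            simp [findA, hx, hp]
          rw [hres]
          have hrootxr : RootUF d x (findA fuel d p).1 := root_cons (hpstep ▸ hrootP)
          have hrootxr1 : RootUF (findA fuel d p).2 x (findA fuel d p).1 :=
            (hequiv _ _).mpr hrootxr
          refine ⟨hrootxr, inv_insert_root hinv' hrootxr1, ?_⟩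
          intro y s
          rw [root_insert_equiv hrootxr1 y s, hequiv y s]

theorem find_full {d : PySem.Dict Char Char} (hinv : InvUF d) (x : Char) :
    RootUF d x (findA (d.size+1) d x).1 ∧ InvUF (findA (d.size+1) d x).2 ∧
      (∀ y s, RootUF (findA (d.size+1) d x).2 y s ↔ RootUF d y s) := by
  obtain ⟨n, hn, hr⟩ := root_total hinv x
  exact find_spec (d.size+1) d x n hinv (by omega) hr

theorem root_of_total {d : PySem.Dict Char Char} (hinv : InvUF d) (u : Char) :
    ∃ r, RootUF d u r := by
  obtain ⟨n, _, hr⟩ := root_total hinv u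
  exact ⟨_, n, rfl, hr⟩

theorem union_spec {d : PySem.Dict Char Char} (hinv : InvUF d) (x y : Char) :
    InvUF (unionA d x y) ∧
      ∀ u v, SRel (unionA d x y) u v ↔
        (SRel d u v ∨ (SRel d u x ∧ SRel d v y) ∨ (SRel d u y ∧ SRel d v x)) := by
  obtain ⟨hrx, hinv1, heq1⟩ := find_full hinv x
  obtain ⟨hry1, hinv2, heq2⟩ := find_full hinv1 y
  set rx := (findA (d.size+1) d x).1 with hrxdef
  set d1 := (findA (d.size+1) d x).2 with hd1def
  set ry := (findA (d1.size+1) d1 y).1 with hrydef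
  set d2 := (findA (d1.size+1) d1 y).2 with hd2def
  have hry : RootUF d y ry := (heq1 _ _).mp hry1
  have hrx2 : RootUF d2 x rx := (heq2 _ _).mpr ((heq1 _ _).mpr hrx)
  have hry2 : RootUF d2 y ry := (heq2 _ _).mpr hry1
  have hcomb : ∀ u s, RootUF d2 u s ↔ RootUF d u s := fun u s => (heq2 u s).trans (heq1 u s)
  have hunfold : unionA d x y = if rx ≠ ry then d2.insert rx ry else d2 := rfl
  by_cases hne : rx = ry
  · rw [hunfold, if_neg (by simp [hne])]
    refine ⟨hinv2, ?_⟩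
    intro u v
    rw [sr_equiv hcomb]
    have hsxy : SRel d x y := ⟨ry, hne ▸ hrx, hry⟩
    constructor
    · exact Or.inl
    · rintro (h | ⟨h1, h2⟩ | ⟨h1, h2⟩)
      · exact h
      · exact sr_trans (sr_trans h1 hsxy) (sr_symm h2)
      · exact sr_trans (sr_trans h1 (sr_symm hsxy)) (sr_symm h2)
  · rw [hunfold, if_pos hne]
    have hRx : IsRootUF d2 rx := root_isroot hrx2
    have hRy : IsRootUF d2 ry := root_isroot hry2
    refine ⟨inv_union hRx hRy hne hinv2, ?_⟩
    intro u v
    obtain ⟨ru, huru⟩ := root_of_total hinv u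
    obtain ⟨rv, hvrv⟩ := root_of_total hinv v
    have hud' : RootUF (d2.insert rx ry) u (if ru = rx then ry else ru) :=
      (root_union_equiv hRx hRy hne u _).mpr ⟨ru, (hcomb _ _).mpr huru, rfl⟩
    have hvd' : RootUF (d2.insert rx ry) v (if rv = rx then ry else rv) :=
      (root_union_equiv hRx hRy hne v _).mpr ⟨rv, (hcomb _ _).mpr hvrv, rfl⟩
    rw [sr_iff_roots hud' hvd', sr_iff_roots huru hvrv,
        sr_iff_roots huru hrx, sr_iff_roots hvrv hry,
        sr_iff_roots huru hry, sr_iff_roots hvrv hrx]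
    by_cases h1 : ru = rx <;> by_cases h2 : rv = rx
    · simp [h1, h2]
    · rw [if_pos h1, if_neg h2]
      constructor
      · intro h; exact Or.inr (Or.inl ⟨h1, h.symm⟩)
      · rintro (h | ⟨-, h⟩ | ⟨hu2, hv2⟩)
        · exact absurd (h.symm.trans h1) h2
        · exact h.symm
        · exact absurd hv2 h2
    · rw [if_neg h1, if_pos h2]
      constructor
      · intro h; exact Or.inr (Or.inr ⟨h, h2⟩)
      · rintro (h | ⟨hu2, -⟩ | ⟨hu2, -⟩)
        · exact absurd (h.trans h2) h1
        · exact absurd hu2 h1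
        · exact hu2
    · rw [if_neg h1, if_neg h2]
      constructor
      · exact Or.inl
      · rintro (h | ⟨hu2, -⟩ | ⟨-, hv2⟩)
        · exact h
        · exact absurd hu2 h1
        · exact absurd hv2 h2

-- ---- B-side label lemmas ----

theorem eqL_key {comp : PySem.Dict Char Int} {a : Char} {ca : Int}
    (hca : comp.get? a = some ca) (u : Char) :
    eqL comp u a ↔ comp.get? u = some ca := by
  unfold eqL
  constructor
  · rintro (rfl | ⟨i, hu, ha⟩)
    · exact hca
    · rw [hca, Option.some_inj] at ha
      rw [ha]
      exact hu
  · intro hu; exact Or.inr ⟨ca, hu, hca⟩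

theorem get?_relabel (comp : PySem.Dict Char Int) (ca cb : Int) (w : Char) :
    (PySem.Dict.mk (comp.items.map (fun p => (p.1, if p.2 = ca then cb else p.2)))).get? w =
      (comp.get? w).map (fun t => if t = ca then cb else t) := by
  suffices h : ∀ (l : List (Char × Int)),
      (PySem.Dict.mk (l.map (fun p => (p.1, if p.2 = ca then cb else p.2)))).get? w =
        ((PySem.Dict.mk l).get? w).map (fun t => if t = ca then cb else t) from h comp.items
  intro l
  induction l with
  | nil => rfl
  | cons p rest ih =>
    obtain ⟨k, v⟩ := p
    simp only [List.map_cons]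
    rw [PySem.Dict.get?_mk_cons, PySem.Dict.get?_mk_cons]
    by_cases hk : k == w
    · rw [if_pos hk, if_pos hk]; rfl
    · rw [if_neg hk, if_neg hk]; exact ih

theorem eqL_insert_fresh {comp : PySem.Dict Char Int} {nxt : Int} (hB : BInv comp nxt)
    {a : Char} (ha : comp.get? a = none) (u v : Char) :
    eqL (comp.insert a nxt) u v ↔ eqL comp u v := by
  unfold eqL
  rw [PySem.Dict.get?_insert, PySem.Dict.get?_insert]
  constructor
  · rintro (rfl | ⟨i, hu, hv⟩)
    · exact Or.inl rfl
    · split_ifs at hu hv with hu1 hv1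
      · exact Or.inl (hu1.trans hv1.symm)
      · rw [Option.some_inj] at hu
        have := hB v i hv
        omega
      · rw [Option.some_inj] at hv
        have := hB u i hu
        omega
      · exact Or.inr ⟨i, hu, hv⟩
  · rintro (rfl | ⟨i, hu, hv⟩)
    · exact Or.inl rfl
    · have hua : u ≠ a := by rintro rfl; rw [ha] at hu; cases hu
      have hva : v ≠ a := by rintro rfl; rw [ha] at hv; cases hv
      rw [if_neg hua, if_neg hva]
      exact Or.inr ⟨i, hu, hv⟩

theorem binv_insert_fresh {comp : PySem.Dict Char Int} {nxt : Int} (hB : BInv comp nxt)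
    (a : Char) : BInv (comp.insert a nxt) (nxt + 1) := by
  intro u i hu
  rw [PySem.Dict.get?_insert] at hu
  split_ifs at hu
  · rw [Option.some_inj] at hu; omega
  · have := hB u i hu; omega

theorem eqL_relabel {comp : PySem.Dict Char Int} {a b : Char} {ca cb : Int}
    (hca : comp.get? a = some ca) (hcb : comp.get? b = some cb) (hne : ca ≠ cb) (u v : Char) :
    eqL (PySem.Dict.mk (comp.items.map (fun p => (p.1, if p.2 = ca then cb else p.2)))) u v ↔
      (eqL comp u v ∨ (eqL comp u a ∧ eqL comp v b) ∨ (eqL comp u b ∧ eqL comp v a)) := by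
  have hkey : ∀ i i' : Int, (if i = ca then cb else i) = (if i' = ca then cb else i') ↔
      (i = i' ∨ (i = ca ∧ i' = cb) ∨ (i = cb ∧ i' = ca)) := by
    intro i i'
    split_ifs <;> omega
  constructor
  · rintro (rfl | ⟨j, hu, hv⟩)
    · exact Or.inl (Or.inl rfl)
    · rw [get?_relabel] at hu hv
      obtain ⟨i, hui, hfi⟩ := Option.map_eq_some_iff.mp hu
      obtain ⟨i', hvi, hfi'⟩ := Option.map_eq_some_iff.mp hv
      rcases (hkey i i').mp (hfi.trans hfi'.symm) with rfl | ⟨hia, hib⟩ | ⟨hia, hib⟩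
      · exact Or.inl (Or.inr ⟨i, hui, hvi⟩)
      · exact Or.inr (Or.inl ⟨(eqL_key hca u).mpr (hia ▸ hui), (eqL_key hcb v).mpr (hib ▸ hvi)⟩)
      · exact Or.inr (Or.inr ⟨(eqL_key hcb u).mpr (hia ▸ hui), (eqL_key hca v).mpr (hib ▸ hvi)⟩)
  · rintro (h | ⟨p, q⟩ | ⟨p, q⟩)
    · rcases h with rfl | ⟨i, hu, hv⟩
      · exact Or.inl rfl
      · refine Or.inr ⟨if i = ca then cb else i, ?_, ?_⟩ <;>
          rw [get?_relabel] <;> simp only [Option.map] <;> [rw [hu]; rw [hv]]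
    · have hu := (eqL_key hca u).mp p
      have hv := (eqL_key hcb v).mp q
      refine Or.inr ⟨cb, ?_, ?_⟩ <;> rw [get?_relabel]
      · rw [hu]; simp
      · rw [hv]; simp [Ne.symm hne]
    · have hu := (eqL_key hcb u).mp p
      have hv := (eqL_key hca v).mp q
      refine Or.inr ⟨cb, ?_, ?_⟩ <;> rw [get?_relabel]
      · rw [hu]; simp [Ne.symm hne]
      · rw [hv]; simp

theorem ensure_spec {st : PySem.Dict Char Int × Int} (hB : BInv st.1 st.2) (v : Char) :
    (∀ u w, eqL (ensureB st v).1 u w ↔ eqL st.1 u w) ∧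
    BInv (ensureB st v).1 (ensureB st v).2 ∧
    (∃ c, (ensureB st v).1.get? v = some c) ∧
    (∀ w i, st.1.get? w = some i → (ensureB st v).1.get? w = some i) := by
  obtain ⟨comp, nxt⟩ := st
  by_cases hc : comp.contains v
  · have hEq : ensureB (comp, nxt) v = (comp, nxt) := by simp [ensureB, hc]
    rw [hEq]
    refine ⟨fun u w => Iff.rfl, hB, ?_, fun w i h => h⟩
    have hiso := PySem.Dict.contains_eq_isSome_get? comp v
    rw [hc] at hiso
    cases hg : comp.get? v with
    | none => rw [hg] at hiso; simp at hiso
    | some c => exact ⟨c, rfl⟩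
  · have hEq : ensureB (comp, nxt) v = (comp.insert v nxt, nxt + 1) := by simp [ensureB, hc]
    rw [hEq]
    have hnone : comp.get? v = none :=
      (PySem.Dict.get?_eq_none_iff_contains comp v).mpr (by simpa using hc)
    refine ⟨fun u w => eqL_insert_fresh hB hnone u w, binv_insert_fresh hB v,
      ⟨nxt, PySem.Dict.get?_insert_self comp v nxt⟩, ?_⟩
    intro w i hw
    rw [PySem.Dict.get?_insert]
    have hwv : w ≠ v := by rintro rfl; rw [hnone] at hw; cases hw
    rw [if_neg hwv]
    exact hw

-- ---- the simulation: one "=" step ----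

theorem step_sim {d : PySem.Dict Char Char} {comp : PySem.Dict Char Int} {nxt : Int}
    (e : String) (hinv : InvUF d) (hB : BInv comp nxt) (hsim : SimUF d comp) :
    InvUF (stepA d e) ∧ BInv (altStep (comp, nxt) e).1 (altStep (comp, nxt) e).2 ∧
      SimUF (stepA d e) (altStep (comp, nxt) e).1 := by
  unfold stepA altStep
  by_cases h1 : PySem.Str.pyGet? e 1 = some '='
  · rw [if_pos h1, if_pos h1]
    cases h0 : PySem.Str.pyGet? e 0 with
    | none => exact ⟨hinv, hB, hsim⟩
    | some a =>
      cases h3 : PySem.Str.pyGet? e 3 with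
      | none => exact ⟨hinv, hB, hsim⟩
      | some b =>
        obtain ⟨hE1, hB1, -, hpres1⟩ := ensure_spec (st := (comp, nxt)) hB a
        obtain ⟨hE2, hB2, ⟨cb, hcb⟩, hpres2⟩ := ensure_spec hB1 b
        obtain ⟨hE1', hB1', ⟨ca0, hca0⟩, -⟩ := ensure_spec (st := (comp, nxt)) hB a
        have hca : (ensureB (ensureB (comp, nxt) a) b).1.get? a = some ca0 := hpres2 a ca0 hca0
        have hgda : (ensureB (ensureB (comp, nxt) a) b).1.getD a 0 = ca0 :=
          PySem.Dict.getD_of_get?_eq_some _ 0 hca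
        have hgdb : (ensureB (ensureB (comp, nxt) a) b).1.getD b 0 = cb :=
          PySem.Dict.getD_of_get?_eq_some _ 0 hcb
        have hsim2 : SimUF d (ensureB (ensureB (comp, nxt) a) b).1 := fun u v =>
          (hsim u v).trans ((hE2 u v).trans (hE1 u v)).symm
        obtain ⟨hIu, hSRu⟩ := union_spec hinv a b
        simp only [hgda, hgdb]
        by_cases hlab : ca0 = cb
        · rw [if_neg (by simp [hlab])]
          refine ⟨hIu, hB2, ?_⟩
          intro u v
          rw [hSRu u v]
          have hsab : SRel d a b :=
            (hsim2 a b).mpr (Or.inr ⟨ca0, hca, by rw [hlab] at hca ⊢; exact hcb⟩)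
          constructor
          · rintro (h | ⟨p, q⟩ | ⟨p, q⟩)
            · exact (hsim2 u v).mp h
            · exact (hsim2 u v).mp (sr_trans (sr_trans p hsab) (sr_symm q))
            · exact (hsim2 u v).mp (sr_trans (sr_trans p (sr_symm hsab)) (sr_symm q))
          · intro h
            exact Or.inl ((hsim2 u v).mpr h)
        · rw [if_pos hlab]
          refine ⟨hIu, ?_, ?_⟩
          · intro u i hu
            rw [get?_relabel] at hu
            obtain ⟨j, hj, rfl⟩ := Option.map_eq_some_iff.mp hu
            by_cases hj2 : j = ca0
            · rw [if_pos hj2]; exact hB2 b cb hcb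
            · rw [if_neg hj2]; exact hB2 u j hj
          · intro u v
            rw [hSRu u v, eqL_relabel hca hcb hlab u v]
            constructor
            · rintro (h | ⟨p, q⟩ | ⟨p, q⟩)
              · exact Or.inl ((hsim2 u v).mp h)
              · exact Or.inr (Or.inl ⟨(hsim2 u a).mp p, (hsim2 v b).mp q⟩)
              · exact Or.inr (Or.inr ⟨(hsim2 u b).mp p, (hsim2 v a).mp q⟩)
            · rintro (h | ⟨p, q⟩ | ⟨p, q⟩)
              · exact Or.inl ((hsim2 u v).mpr h)
              · exact Or.inr (Or.inl ⟨(hsim2 u a).mpr p, (hsim2 v b).mpr q⟩)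
              · exact Or.inr (Or.inr ⟨(hsim2 u b).mpr p, (hsim2 v a).mpr q⟩)
  · rw [if_neg h1, if_neg h1]
    exact ⟨hinv, hB, hsim⟩

theorem loop_sim : ∀ (eqs : List String) (d : PySem.Dict Char Char)
    (comp : PySem.Dict Char Int) (nxt : Int),
    InvUF d → BInv comp nxt → SimUF d comp →
    InvUF (eqs.foldl stepA d) ∧
    BInv (eqs.foldl altStep (comp, nxt)).1 (eqs.foldl altStep (comp, nxt)).2 ∧
    SimUF (eqs.foldl stepA d) (eqs.foldl altStep (comp, nxt)).1 := by
  intro eqs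
  induction eqs with
  | nil => intro d comp nxt h1 h2 h3; exact ⟨h1, h2, h3⟩
  | cons e rest ih =>
    intro d comp nxt h1 h2 h3
    obtain ⟨g1, g2, g3⟩ := step_sim e h1 h2 h3
    simp only [List.foldl_cons]
    have heta : altStep (comp, nxt) e = ((altStep (comp, nxt) e).1, (altStep (comp, nxt) e).2) := rfl
    rw [heta]
    exact ih (stepA d e) (altStep (comp, nxt) e).1 (altStep (comp, nxt) e).2 g1 g2 g3

-- ---- the second pass ----

theorem check_sim : ∀ (rest : List String) (d : PySem.Dict Char Char)
    (comp : PySem.Dict Char Int), InvUF d → SimUF d comp →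
    checkA d rest = altCheck comp rest := by
  intro rest
  induction rest with
  | nil => intro d comp _ _; rfl
  | cons e rest ih =>
    intro d comp hinv hsim
    show (if PySem.Str.pyGet? e 1 = some '!' then _ else checkA d rest) =
      (if PySem.Str.pyGet? e 1 = some '!' then _ else altCheck comp rest)
    by_cases h1 : PySem.Str.pyGet? e 1 = some '!'
    · rw [if_pos h1, if_pos h1]
      cases h0 : PySem.Str.pyGet? e 0 with
      | none => exact ih d comp hinv hsim
      | some a =>
        cases h3 : PySem.Str.pyGet? e 3 with
        | none => exact ih d comp hinv hsim
        | some b =>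
          dsimp only
          obtain ⟨hra, hinv1, heq1⟩ := find_full hinv a
          obtain ⟨hrb1, hinv2, heq2⟩ := find_full hinv1 b
          have hrb : RootUF d b (findA ((findA (d.size+1) d a).2.size+1) (findA (d.size+1) d a).2 b).1 :=
            (heq1 _ _).mp hrb1
          have hcomb : ∀ u s, RootUF (findA ((findA (d.size+1) d a).2.size+1) (findA (d.size+1) d a).2 b).2 u s ↔ RootUF d u s :=
            fun u s => (heq2 u s).trans (heq1 u s)
          have hsim2 : SimUF (findA ((findA (d.size+1) d a).2.size+1) (findA (d.size+1) d a).2 b).2 comp :=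
            fun u v => (sr_equiv hcomb u v).trans (hsim u v)
          have hcond : ((findA (d.size+1) d a).1 =
              (findA ((findA (d.size+1) d a).2.size+1) (findA (d.size+1) d a).2 b).1) ↔ eqL comp a b :=
            (sr_iff_roots hra hrb).symm.trans (hsim a b)
          have hrec : checkA (findA ((findA (d.size+1) d a).2.size+1) (findA (d.size+1) d a).2 b).2 rest =
              altCheck comp rest := ih _ comp hinv2 hsim2
          by_cases hab : a = b
          · have : eqL comp a b := Or.inl hab
            rw [if_pos ((hcond).mpr this), if_pos hab]
          · rw [if_neg hab]
            cases hga : comp.get? a with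
            | none =>
              have hne : ¬ eqL comp a b := by
                rintro (h | ⟨i, hu, -⟩)
                · exact hab h
                · rw [hga] at hu; cases hu
              rw [if_neg fun h => hne (hcond.mp h)]
              exact hrec
            | some ca =>
              cases hgb : comp.get? b with
              | none =>
                have hne : ¬ eqL comp a b := by
                  rintro (h | ⟨i, -, hv⟩)
                  · exact hab h
                  · rw [hgb] at hv; cases hv
                rw [if_neg fun h => hne (hcond.mp h)]
                exact hrec
              | some cbb =>
                dsimp only
                by_cases hcc : ca = cbb
                · have : eqL comp a b := Or.inr ⟨ca, hga, by rw [hcc]; exact hgb⟩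
                  rw [if_pos (hcond.mpr this), if_pos hcc]
                · have hne : ¬ eqL comp a b := by
                    rintro (h | ⟨i, hu, hv⟩)
                    · exact hab h
                    · rw [hga, Option.some_inj] at hu
                      rw [hgb, Option.some_inj] at hv
                      exact hcc (hu.trans hv.symm)
                  rw [if_neg fun h => hne (hcond.mp h), if_neg hcc]
                  exact hrec
    · rw [if_neg h1, if_neg h1]
      exact ih d comp hinv hsim

-- ---- initial states ----

theorem inv_empty : InvUF PySem.Dict.empty := by
  refine ⟨PySem.Dict.nodup_keys_empty, fun _ => 0, ?_⟩
  intro x hx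
  simp [pstep, PySem.Dict.getD_empty] at hx

theorem binv_empty : BInv PySem.Dict.empty 0 := by
  intro u i hu
  rw [PySem.Dict.get?_empty] at hu
  cases hu

theorem sim_empty : SimUF PySem.Dict.empty PySem.Dict.empty := by
  have hid : ∀ w : Char, pstep PySem.Dict.empty w = w := by
    intro w; simp [pstep, PySem.Dict.getD_empty]
  intro u v
  constructor
  · rintro ⟨r, ⟨n, hn, -⟩, ⟨m, hm, -⟩⟩
    rw [iter_fix (hid u) n] at hn
    rw [iter_fix (hid v) m] at hm
    exact Or.inl (hn.trans hm.symm)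
  · rintro (rfl | ⟨i, hu, -⟩)
    · exact ⟨u, root_self (hid u), root_self (hid u)⟩
    · rw [PySem.Dict.get?_empty] at hu; cases hu

-- ===== VERDICT (by name: the statement is the Claim_ definition above) =====
theorem validEquation_spec : Claim_equal_validEquation := by
  unfold Claim_equal_validEquation
  intro eqs _ _
  unfold Spec_validEquation validEquation validEquation_alt
  by_cases h : eqs = []
  · rw [if_pos h, if_pos h]
  · rw [if_neg h, if_neg h]
    obtain ⟨hI, -, hS⟩ := loop_sim eqs PySem.Dict.empty PySem.Dict.empty 0 inv_empty binv_empty sim_empty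
    unfold firstPassA
    exact check_sim eqs _ _ hI hS
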